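-- pv_equiv track=rewrite | github.com/saztonov/RD | rd_core/pdf_split.py | calculate_page_ranges
-- ===== SOURCE A (Python) =====
-- from typing import List, Tuple
--
-- def calculate_page_ranges(
--     total_pages: int, num_parts: int
-- ) -> List[Tuple[int, int]]:
--     """
--     Вычислить диапазоны страниц для разделения.
--
--     Неравномерное распределение: первые части получают +1 страницу.
--     Пример: 10 страниц / 3 = [4, 3, 3] -> [(0,3), (4,6), (7,9)]
--
--     Args:
--         total_pages: Общее количество страниц
--         num_parts: Количество частей
--
--     Returns:
--         Список кортежей (start_page, end_page) включительно, 0-based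
--
--     Raises:
--         ValueError: если num_parts < 2 или > total_pages
--     """
--     if num_parts < 2:
--         raise ValueError(
--             f"Количество частей должно быть >= 2, получено: {num_parts}"
--         )
--     if num_parts > total_pages:
--         raise ValueError(
--             f"Количество частей ({num_parts}) больше количества страниц ({total_pages})"
--         )
--
--     base_size = total_pages // num_parts
--     remainder = total_pages % num_parts
--
--     ranges = []
--     start = 0
--     for i in range(num_parts):
--         size = base_size + (1 if i < remainder else 0)
--         end = start + size - 1
--         ranges.append((start, end))
--         start = end + 1
--
--     return ranges
-- ===== SOURCE B (Python) =====
-- def calculate_page_ranges(total_pages, num_parts):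
--     if num_parts < 2:
--         raise ValueError(
--             f"Количество частей должно быть >= 2, получено: {num_parts}"
--         )
--     if num_parts > total_pages:
--         raise ValueError(
--             f"Количество частей ({num_parts}) больше количества страниц ({total_pages})"
--         )
--     base, rem = divmod(total_pages, num_parts)
--     return [
--         (i * base + min(i, rem), (i + 1) * base + min(i + 1, rem) - 1)
--         for i in range(num_parts)
--     ]
-- ===== Notes on version B (the rewrite author's own statement) =====
-- stated objective: alternative
-- what changed: Replaces the state-threaded loop (running start/end accumulator) with a per-index closed form: each range is computed independently as (i*base + min(i, rem), (i+1)*base + min(i+1, rem) - 1) in a list comprehension.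
import Mathlib
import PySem

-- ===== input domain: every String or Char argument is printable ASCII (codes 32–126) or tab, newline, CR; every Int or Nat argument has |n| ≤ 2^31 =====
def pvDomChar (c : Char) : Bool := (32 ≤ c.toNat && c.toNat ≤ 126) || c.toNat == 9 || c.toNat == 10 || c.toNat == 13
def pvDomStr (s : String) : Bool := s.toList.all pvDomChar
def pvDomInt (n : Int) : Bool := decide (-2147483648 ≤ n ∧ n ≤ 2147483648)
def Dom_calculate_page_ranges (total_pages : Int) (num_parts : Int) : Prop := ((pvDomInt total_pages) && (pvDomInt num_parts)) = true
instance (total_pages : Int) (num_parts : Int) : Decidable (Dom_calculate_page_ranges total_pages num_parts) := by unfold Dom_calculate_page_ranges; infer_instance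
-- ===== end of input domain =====

-- B replaces A's running start/end accumulator with an independent closed-form range per index (alternative decomposition, same cost).

-- ===== PORT A =====
def calculate_page_ranges (total_pages : Int) (num_parts : Int) : List (Int × Int) :=
  -- raises ValueError when num_parts < 2 or num_parts > total_pages: excluded by Pre_
  let base_size := PySem.Int.floordiv total_pages num_parts
  let remainder := PySem.Int.mod total_pages num_parts
  let st := (PySem.List.pyRange 0 num_parts 1).foldl
    (fun (s : List (Int × Int) × Int) i =>
      let size := base_size + (if i < remainder then 1 else 0)
      let e := s.2 + size - 1
      (s.1 ++ [(s.2, e)], e + 1)) ([], 0)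
  st.1

-- ===== PORT B =====
def calculate_page_ranges_alt (total_pages : Int) (num_parts : Int) : List (Int × Int) :=
  -- same two ValueError guards: excluded by Pre_
  let base := PySem.Int.floordiv total_pages num_parts
  let rem := PySem.Int.mod total_pages num_parts
  (PySem.List.pyRange 0 num_parts 1).map
    (fun i => (i * base + min i rem, (i + 1) * base + min (i + 1) rem - 1))

-- ===== PRECONDITION & SPEC =====
-- Pre_ excludes exactly the inputs on which both Pythons raise ValueError (num_parts < 2 or num_parts > total_pages).
def Pre_calculate_page_ranges (total_pages : Int) (num_parts : Int) : Prop :=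
  2 ≤ num_parts ∧ num_parts ≤ total_pages
instance (total_pages : Int) (num_parts : Int) : Decidable (Pre_calculate_page_ranges total_pages num_parts) := by unfold Pre_calculate_page_ranges; infer_instance
def pvWitness_calculate_page_ranges : Int × Int := (10, 3)

def Spec_calculate_page_ranges (total_pages : Int) (num_parts : Int) (out : List (Int × Int)) : Prop := out = calculate_page_ranges_alt total_pages num_parts
instance (total_pages : Int) (num_parts : Int) (out : List (Int × Int)) : Decidable (Spec_calculate_page_ranges total_pages num_parts out) := by unfold Spec_calculate_page_ranges; infer_instance

-- ===== CLAIM (what is proved, stated in full; the proofs are below) =====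
def Claim_equal_calculate_page_ranges : Prop := ∀ (total_pages : Int) (num_parts : Int), Dom_calculate_page_ranges total_pages num_parts → Pre_calculate_page_ranges total_pages num_parts → Spec_calculate_page_ranges total_pages num_parts (calculate_page_ranges total_pages num_parts)

-- ===== LEMMAS AND PROOFS =====

-- A's loop invariant: after the first n iterations the accumulator is B's map over the
-- same indices and the running start equals the closed form n*base + min n rem.
theorem pv_loop_invariant (base rem : Int) (hrem : 0 ≤ rem) (n : Nat) :
    (PySem.List.pyRange 0 (n : Int) 1).foldl
      (fun (s : List (Int × Int) × Int) i =>
        let size := base + (if i < rem then 1 else 0)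
        let e := s.2 + size - 1
        (s.1 ++ [(s.2, e)], e + 1)) ([], 0)
    = ((PySem.List.pyRange 0 (n : Int) 1).map
        (fun i => (i * base + min i rem, (i + 1) * base + min (i + 1) rem - 1)),
       (n : Int) * base + min (n : Int) rem) := by
  induction n with
  | zero => simp [PySem.List.pyRange, min_eq_left hrem]
  | succ k ih =>
    have hcast : ((k + 1 : Nat) : Int) = (k : Int) + 1 := by push_cast; ring
    rw [hcast, PySem.List.pyRange_one_succ_right (by positivity), List.foldl_append,
        List.map_append, ih]
    simp only [List.foldl_cons, List.foldl_nil, List.map_cons, List.map_nil,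
      Prod.mk.injEq, List.append_cancel_left_eq, List.cons.injEq, and_true]
    by_cases h : (k : Int) < rem
    · rw [if_pos h, min_eq_left (by omega), min_eq_left (by omega)]
      refine ⟨⟨trivial, by ring⟩, by ring⟩
    · rw [if_neg h, min_eq_right (by omega), min_eq_right (by omega)]
      refine ⟨⟨trivial, by ring⟩, by ring⟩

-- ===== VERDICT (by name: the statement is the Claim_ definition above) =====
theorem calculate_page_ranges_spec : Claim_equal_calculate_page_ranges := by
  intro total_pages num_parts _ hpre
  obtain ⟨h2, _⟩ := hpre
  unfold Spec_calculate_page_ranges calculate_page_ranges calculate_page_ranges_alt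
  obtain ⟨n, hn⟩ : ∃ n : Nat, num_parts = (n : Int) :=
    ⟨num_parts.toNat, by omega⟩
  subst hn
  have hrem : 0 ≤ PySem.Int.mod total_pages (n : Int) := PySem.Int.mod_nonneg _ (by omega)
  simp only [pv_loop_invariant _ _ hrem]
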